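-- pv_equiv track=rewrite | github.com/CarletonComputerScienceSociety/advent-of-code | 2022/day-01/AdamPayzant/solution.py | part1
-- ===== SOURCE A (Python) =====
-- def part1(input: list[str]) -> int:
--     greatest = 0
--     current = 0
--     for line in input:
--         if line == '':
--             if current > greatest:
--                 greatest = current
--             current = 0
--             continue
--         current += int(line)
--     if current > greatest:
--         greatest = current
--
--     return greatest
-- ===== SOURCE B (Python) =====
-- def part1(input: list[str]) -> int:
--     # Two-phase: materialise groups of consecutive non-empty lines, sum each, then reduce.
--     groups = []
--     cur = []
--     for line in input:
--         if line == '':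
--             if cur:
--                 groups.append(cur)
--                 cur = []
--         else:
--             cur.append(int(line))
--     if cur:
--         groups.append(cur)
--     sums = [sum(g) for g in groups]
--     return max([0] + sums)
-- ===== Notes on version B (the rewrite author's own statement) =====
-- stated objective: simpler
-- what changed: B partitions the input into groups of consecutive non-empty lines, materialises each group's sum into a list, and then takes max([0] + sums) in a separate reduction phase, instead of A's inline running-maximum with a duplicated final comparison.
import Mathlib
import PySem

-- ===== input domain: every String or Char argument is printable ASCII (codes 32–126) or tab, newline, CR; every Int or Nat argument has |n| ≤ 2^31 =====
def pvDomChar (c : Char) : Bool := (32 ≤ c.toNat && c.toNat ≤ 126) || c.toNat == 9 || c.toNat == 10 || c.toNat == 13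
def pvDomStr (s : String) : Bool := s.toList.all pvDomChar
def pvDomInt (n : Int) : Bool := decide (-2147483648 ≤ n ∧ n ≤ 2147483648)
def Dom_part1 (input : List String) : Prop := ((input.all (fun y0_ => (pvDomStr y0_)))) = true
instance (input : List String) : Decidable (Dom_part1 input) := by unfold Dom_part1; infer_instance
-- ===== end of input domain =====

-- ===== PORT A =====
-- step of A's for-loop over (greatest, current); int(line) = PySem.Int.ofStr?
-- (.getD 0 is unreachable under Pre_part1: Python's int(line) raises ValueError exactly where ofStr? is none)
def stepA (p : Int × Int) (line : String) : Int × Int :=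
  if line == "" then
    (if p.2 > p.1 then p.2 else p.1, 0)
  else
    (p.1, p.2 + ((PySem.Int.ofStr? line).getD 0))

def part1 (input : List String) : Int :=
  let s := input.foldl stepA (0, 0)
  if s.2 > s.1 then s.2 else s.1

-- ===== PORT B =====
-- step of B's grouping loop over (groups, cur)
def stepB (st : List (List Int) × List Int) (line : String) : List (List Int) × List Int :=
  if line == "" then
    if st.2 ≠ [] then (st.1 ++ [st.2], []) else (st.1, [])
  else
    (st.1, st.2 ++ [((PySem.Int.ofStr? line).getD 0)])

-- Python max over a nonempty list (first element as the start)
def pyMax : List Int → Int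
  | [] => 0
  | h :: t => t.foldl max h

def part1_alt (input : List String) : Int :=
  let p := input.foldl stepB ([], [])
  let groups := if p.2 ≠ [] then p.1 ++ [p.2] else p.1
  let sums := groups.map List.sum
  pyMax (0 :: sums)

-- ===== PRECONDITION & SPEC =====
-- Pre_ excludes inputs containing a non-empty line that is not a valid int literal: there Python's int(line) raises ValueError in A (and in B).
def Pre_part1 (input : List String) : Prop :=
  ∀ line ∈ input, line ≠ "" → (PySem.Int.ofStr? line).isSome = true
instance (input : List String) : Decidable (Pre_part1 input) := by unfold Pre_part1; infer_instance
def pvWitness_part1 : List String := ["1", "2", "", "-3"]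
def Spec_part1 (input : List String) (out : Int) : Prop := out = part1_alt input
instance (input : List String) (out : Int) : Decidable (Spec_part1 input out) := by unfold Spec_part1; infer_instance

-- ===== CLAIM (what is proved, stated in full; the proofs are below) =====
def Claim_equal_part1 : Prop := ∀ (input : List String), Dom_part1 input → Pre_part1 input → Spec_part1 input (part1 input)

-- ===== LEMMAS AND PROOFS =====

theorem ite_gt_eq_max (a b : Int) : (if b > a then b else a) = max a b := by omega

theorem foldl_max_append (l : List Int) (a x : Int) :
    List.foldl max a (l ++ [x]) = max (List.foldl max a l) x := by
  simp [List.foldl_append]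

theorem aux (rest : List String) (g : Int) (cur : List Int) (gs : List (List Int))
    (hg : 0 ≤ g) (hgs : g = List.foldl max 0 (gs.map List.sum)) :
    (let s := rest.foldl stepA (g, cur.sum);
     if s.2 > s.1 then s.2 else s.1)
    = (let p := rest.foldl stepB (gs, cur);
       pyMax (0 :: ((if p.2 ≠ [] then p.1 ++ [p.2] else p.1).map List.sum))) := by
  induction rest generalizing g cur gs with
  | nil =>
    simp only [List.foldl_nil, pyMax]
    by_cases hc : cur = []
    · subst hc
      simp only [List.sum_nil, ne_eq, not_true_eq_false, if_false, hgs]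
      omega
    · simp only [hc, ne_eq, not_false_eq_true, if_true, List.map_append, List.map_cons,
        List.map_nil, foldl_max_append, ← hgs, ite_gt_eq_max]
  | cons line rest ih =>
    simp only [List.foldl_cons, stepA, stepB]
    by_cases hl : line == ""
    · simp only [hl, if_true]
      by_cases hc : cur = []
      · subst hc
        simp only [List.sum_nil, ne_eq, not_true_eq_false, if_false]
        have h0 : (if (0 : Int) > g then (0 : Int) else g) = g := by omega
        rw [h0]
        have := ih g ([] : List Int) gs hg hgs
        simpa using this
      · simp only [hc, ne_eq, not_false_eq_true, if_true]
        have hmax : (if cur.sum > g then cur.sum else g) = max g cur.sum := ite_gt_eq_max _ _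
        rw [hmax]
        have hg' : 0 ≤ max g cur.sum := le_trans hg (le_max_left _ _)
        have hgs' : max g cur.sum = List.foldl max 0 ((gs ++ [cur]).map List.sum) := by
          simp [List.map_append, ← hgs]
        have := ih (max g cur.sum) ([] : List Int) (gs ++ [cur]) hg' hgs'
        simpa using this
    · simp only [hl, if_false, Bool.false_eq_true]
      have := ih g (cur ++ [(PySem.Int.ofStr? line).getD 0]) gs hg hgs
      simpa [List.sum_append] using this

-- ===== VERDICT (by name: the statement is the Claim_ definition above) =====
theorem part1_spec : Claim_equal_part1 := by
  intro input _ _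
  unfold Spec_part1 part1 part1_alt
  have := aux input 0 [] [] le_rfl (by simp)
  simpa using this
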